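-- pv_equiv track=rewrite | github.com/giridhararao/TCSdigital | newfolder/string manipulation.py | getb1
-- ===== SOURCE A (Python) =====
-- def getb1(a):
--     v=['a','e','i','o','u','A','E','I','O','U']
--     c=""
--     for i in a:
--         if(i in v):
--             c+=i
--         else:
--             c+='#'
--     return(c)
-- ===== SOURCE B (Python) =====
-- import re
--
-- def getb1(a):
--     return re.sub(r'[^aeiouAEIOU]', '#', a)
-- ===== Notes on version B (the rewrite author's own statement) =====
-- stated objective: idiomatic
-- what changed: Replaced the explicit per-character accumulate loop with a single regex substitution mapping every non-vowel character to a hash.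
import Mathlib
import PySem

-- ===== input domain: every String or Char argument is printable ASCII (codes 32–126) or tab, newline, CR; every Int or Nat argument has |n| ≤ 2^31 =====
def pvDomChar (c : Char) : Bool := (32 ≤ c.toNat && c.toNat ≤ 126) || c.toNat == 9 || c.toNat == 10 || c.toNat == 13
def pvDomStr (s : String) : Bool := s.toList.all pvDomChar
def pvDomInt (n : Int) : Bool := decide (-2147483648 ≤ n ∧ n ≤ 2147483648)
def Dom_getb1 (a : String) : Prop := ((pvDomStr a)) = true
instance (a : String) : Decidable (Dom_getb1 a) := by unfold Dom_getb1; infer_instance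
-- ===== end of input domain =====

-- B replaces A's explicit accumulate-per-char loop with a single regex substitution (idiomatic).

-- ===== PORT A =====
-- A: v = list of vowels; c = ""; for i in a: c += i if i in v else '#'
def getb1 (a : String) : String :=
  let v : List Char := ['a','e','i','o','u','A','E','I','O','U']
  String.mk (a.toList.foldl (fun c i => if i ∈ v then c ++ [i] else c ++ ['#']) [])

-- ===== PORT B =====
-- B: re.sub(r'[^aeiouAEIOU]', '#', a) — the regex engine scans the string once and
-- replaces each char not matching the class [aeiouAEIOU] by '#'; ported exactly as
-- that per-character class-match substitution.
def pvClassMatch (c : Char) : Bool :=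
  c == 'a' || c == 'e' || c == 'i' || c == 'o' || c == 'u' ||
  c == 'A' || c == 'E' || c == 'I' || c == 'O' || c == 'U'

def getb1_alt (a : String) : String :=
  String.mk (a.toList.map (fun c => if pvClassMatch c then c else '#'))

-- ===== PRECONDITION & SPEC =====
def Spec_getb1 (a : String) (out : String) : Prop := out = getb1_alt a
instance (a : String) (out : String) : Decidable (Spec_getb1 a out) := by unfold Spec_getb1; infer_instance

-- ===== CLAIM (what is proved, stated in full; the proofs are below) =====
def Claim_equal_getb1 : Prop := ∀ (a : String), Dom_getb1 a → Spec_getb1 a (getb1 a)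

-- ===== LEMMAS AND PROOFS =====
theorem getb1_foldl (l acc : List Char) :
    l.foldl (fun c i => if i ∈ (['a','e','i','o','u','A','E','I','O','U'] : List Char)
        then c ++ [i] else c ++ ['#']) acc
      = acc ++ l.map (fun c => if pvClassMatch c then c else '#') := by
  induction l generalizing acc with
  | nil => simp
  | cons x xs ih =>
    simp only [List.foldl_cons, List.map_cons, ih]
    by_cases h : x ∈ (['a','e','i','o','u','A','E','I','O','U'] : List Char)
    · have hm : pvClassMatch x = true := by
        simp only [List.mem_cons, List.not_mem_nil, or_false] at h
        rcases h with rfl|rfl|rfl|rfl|rfl|rfl|rfl|rfl|rfl|rfl <;> decide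
      simp [h, hm]
    · have hm : pvClassMatch x = false := by
        simp only [List.mem_cons, List.not_mem_nil, or_false] at h
        simp only [pvClassMatch]
        simp_all
      simp [h, hm]

-- ===== VERDICT (by name: the statement is the Claim_ definition above) =====
theorem getb1_spec : Claim_equal_getb1 := by
  intro a _
  unfold Spec_getb1 getb1 getb1_alt
  show String.mk (List.foldl _ [] a.toList) = _
  rw [getb1_foldl]
  simp
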